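-- pv_equiv track=rewrite | github.com/mrnglory/KoreaUnivSW | 42585.py | solution
-- ===== SOURCE A (Python) =====
-- def solution(arrangement):
--     answer = 0
--     sticks = 0
--     laser_to_r = arrangement.replace('()', 'L')
--     for i in laser_to_r:
--         if i == '(':
--             sticks += 1
--         elif i == ')':
--             sticks -= 1
--             answer += 1
--         else:
--             answer += sticks
--     return answer
-- ===== SOURCE B (Python) =====
-- def solution(arrangement):
--     n = len(arrangement)
--     # Pass 1: prefix-balance array (laser pairs net zero, so bal[i] is the
--     # stick depth in effect at original position i).
--     bal = [0] * (n + 1)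
--     for i, c in enumerate(arrangement):
--         bal[i + 1] = bal[i] + (1 if c == '(' else -1 if c == ')' else 0)
--     # Pass 2: tokenize by index jumps, reading depths from the precomputed array.
--     answer = 0
--     i = 0
--     while i < n:
--         c = arrangement[i]
--         if c == '(' and i + 1 < n and arrangement[i + 1] == ')':
--             answer += bal[i]      # laser pair: fires through bal[i] open sticks
--             i += 2
--         elif c == ')':
--             answer += 1           # bar end: one final piece
--             i += 1
--         elif c != '(':
--             answer += bal[i]      # any other char cut by bal[i] open sticks
--             i += 1
--         else:
--             i += 1                # lone stick-open
--     return answer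
-- ===== Notes on version B (the rewrite author's own statement) =====
-- stated objective: alternative
-- what changed: B replaces A's marker-substitution preprocessing pass and running stick counter by a two-stage algorithm: it first builds a prefix-balance array, then tokenizes the original string with index jumps (consuming adjacent open-close pairs as two-character laser tokens) and reads each token's depth from the precomputed array instead of maintaining a counter.
import Mathlib
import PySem

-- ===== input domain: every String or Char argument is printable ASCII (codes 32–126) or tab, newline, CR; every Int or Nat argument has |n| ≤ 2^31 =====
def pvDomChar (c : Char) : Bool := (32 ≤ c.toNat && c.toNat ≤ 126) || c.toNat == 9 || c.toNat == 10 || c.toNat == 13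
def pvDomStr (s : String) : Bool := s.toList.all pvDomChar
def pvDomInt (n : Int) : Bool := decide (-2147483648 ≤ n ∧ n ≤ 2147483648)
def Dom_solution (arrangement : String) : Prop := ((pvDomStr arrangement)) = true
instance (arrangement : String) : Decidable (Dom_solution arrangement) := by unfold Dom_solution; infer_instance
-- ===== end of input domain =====

-- B replaces A's marker-substitution pass + running-counter loop by a prefix-balance
-- array built first, then an index-jump tokenizer that consumes adjacent open-close
-- laser pairs and reads depths from the array (objective: alternative decomposition).

-- ===== PORT A =====
-- A's for-loop over the replaced string, state (answer, sticks), branches in A's order.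
def solutionLoop (l : List Char) (answer sticks : Int) : Int :=
  match l with
  | [] => answer
  | c :: t =>
    if c = '(' then solutionLoop t answer (sticks + 1)
    else if c = ')' then solutionLoop t (answer + 1) (sticks - 1)
    else solutionLoop t (answer + sticks) sticks

def solution (arrangement : String) : Int :=
  solutionLoop (PySem.Str.replace arrangement "()" "L").toList 0 0

-- ===== PORT B =====
-- B's pass 1: the prefix-balance array bal (bal[i+1] = bal[i] + delta of char i).
def balList : List Char → Int → List Int
  | [], b => [b]
  | c :: t, b => b :: balList t (b + (if c = '(' then 1 else if c = ')' then -1 else 0))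

-- B's while loop: index i jumps by 2 over a '()' laser token, else by 1.
def solutionAltGo (s : List Char) (bal : List Int) (n i : Nat) (answer : Int) : Int :=
  if i < n then
    let c := s.getD i ' '
    if c = '(' ∧ i + 1 < n ∧ s.getD (i + 1) ' ' = ')' then
      solutionAltGo s bal n (i + 2) (answer + bal.getD i 0)
    else if c = ')' then
      solutionAltGo s bal n (i + 1) (answer + 1)
    else if c ≠ '(' then
      solutionAltGo s bal n (i + 1) (answer + bal.getD i 0)
    else
      solutionAltGo s bal n (i + 1) answer
  else answer
termination_by n - i

def solution_alt (arrangement : String) : Int :=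
  solutionAltGo arrangement.toList (balList arrangement.toList 0) arrangement.toList.length 0 0

-- ===== PRECONDITION & SPEC =====
def Spec_solution (arrangement : String) (out : Int) : Prop := out = solution_alt arrangement
instance (arrangement : String) (out : Int) : Decidable (Spec_solution arrangement out) := by unfold Spec_solution; infer_instance

-- ===== CLAIM (what is proved, stated in full; the proofs are below) =====
def Claim_equal_solution : Prop := ∀ (arrangement : String), Dom_solution arrangement → Spec_solution arrangement (solution arrangement)

-- ===== LEMMAS AND PROOFS =====

-- What Python's s.replace('()','L') computes, as a plain structural recursion.
def lasersMarked : List Char → List Char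
  | [] => []
  | [c] => [c]
  | c :: d :: t =>
    if c = '(' ∧ d = ')' then 'L' :: lasersMarked t else c :: lasersMarked (d :: t)

theorem replace_go_eq (fuel : ℕ) (l acc : List Char) (h : l.length ≤ fuel) :
    PySem.Chars.replace.go ['(', ')'] ['L'] fuel l acc = acc.reverse ++ lasersMarked l := by
  induction fuel generalizing l acc with
  | zero =>
    have hl : l = [] := by cases l <;> simp_all
    subst hl
    simp [PySem.Chars.replace.go, lasersMarked]
  | succ n ih =>
    match l with
    | [] => simp [PySem.Chars.replace.go, lasersMarked]
    | [c] =>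
      rw [PySem.Chars.replace.go]
      have hpre : List.isPrefixOf ['(', ')'] [c] = false := by
        simp [List.isPrefixOf]
      rw [hpre]
      simp only [ih [] (c :: acc) (by simp)]
      simp [lasersMarked]
    | c :: d :: t =>
      rw [PySem.Chars.replace.go]
      by_cases hcd : c = '(' ∧ d = ')'
      · obtain ⟨hc, hd⟩ := hcd
        subst hc hd
        have hpre : List.isPrefixOf ['(', ')'] ('(' :: ')' :: t) = true := by
          simp [List.isPrefixOf]
        rw [hpre]
        simp only [if_true]
        have := ih t (['L'].reverse ++ acc) (by simp at h ⊢; omega)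
        simp only [List.length_cons, List.length_nil, List.drop_succ_cons,
          List.drop_zero] at this ⊢
        rw [this]
        simp [lasersMarked]
      · have hpre : List.isPrefixOf ['(', ')'] (c :: d :: t) = false := by
        {  simp only [List.isPrefixOf, Bool.and_eq_true, beq_iff_eq, and_true, ← Bool.not_eq_true]
           rintro ⟨rfl, rfl⟩
           exact hcd ⟨rfl, rfl⟩ }
        rw [hpre]
        simp only [Bool.false_eq_true, if_false]
        rw [ih (d :: t) (c :: acc) (by simp at h ⊢; omega)]
        simp [lasersMarked, hcd]

theorem replace_eq_lasersMarked (l : List Char) :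
    PySem.Chars.replace l ['(', ')'] ['L'] = lasersMarked l := by
  rw [PySem.Chars.replace]
  simp only [List.isEmpty_cons, Bool.false_eq_true, if_false]
  exact replace_go_eq l.length l [] le_rfl

-- balList read at index i ≤ length: base plus the balance of the first i chars.
def pvDelta (c : Char) : Int := if c = '(' then 1 else if c = ')' then -1 else 0

theorem balList_getD (l : List Char) (b : Int) (i : Nat) (h : i ≤ l.length) :
    (balList l b).getD i 0 = b + ((l.take i).map pvDelta).sum := by
  induction l generalizing b i with
  | nil =>
    have : i = 0 := by simpa using h
    subst this; simp [balList]
  | cons c t ih =>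
    cases i with
    | zero => simp [balList]
    | succ j =>
      simp only [balList, List.getD_cons_succ, List.take_succ_cons, List.map_cons, List.sum_cons]
      rw [ih _ j (by simpa using h)]
      simp [pvDelta]
      ring

theorem getD_drop (s : List Char) (i : Nat) (c : Char) (t : List Char)
    (h : s.drop i = c :: t) : s.getD i ' ' = c := by
  have h0 : s[i]? = some c := by
    have h' : (s.drop i)[0]? = s[i + 0]? := List.getElem?_drop
    rw [h] at h'
    simpa using h'.symm
  simp [List.getD, h0]

theorem drop_succ_of_drop (s : List Char) (i : Nat) (c : Char) (t : List Char)
    (h : s.drop i = c :: t) : s.drop (i + 1) = t := by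
  have : s.drop (i + 1) = (s.drop i).drop 1 := by
    rw [List.drop_drop]
  rw [this, h]; simp

theorem go_terminal (s : List Char) (bal : List Int) (n i : Nat) (a : Int) (h : ¬ i < n) :
    solutionAltGo s bal n i a = a := by
  unfold solutionAltGo
  simp [h]

-- The B loop from index i equals A's loop on the laser-marked suffix, with
-- sticks = bal[i].
theorem go_eq_loop (s : List Char) (rest : List Char) (i : Nat) (a : Int)
    (hd : s.drop i = rest) (hi : i ≤ s.length) :
    solutionAltGo s (balList s 0) s.length i a
      = solutionLoop (lasersMarked rest) a ((balList s 0).getD i 0) := by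
  induction rest using lasersMarked.induct generalizing i a with
  | case1 =>
    have hlen : s.length ≤ i := by
      have := List.drop_eq_nil_iff.mp hd
      omega
    have : i = s.length := le_antisymm hi hlen
    rw [go_terminal _ _ _ _ _ (by omega)]
    simp [lasersMarked, solutionLoop]
  | case2 c =>
    have hlt : i < s.length := by
      by_contra hcon
      have : s.drop i = [] := List.drop_eq_nil_iff.mpr (by omega)
      rw [hd] at this; exact absurd this (by simp)
    have hlen : s.length = i + 1 := by
      have := congrArg List.length hd
      simp [List.length_drop] at this
      omega
    have hc : s.getD i ' ' = c := getD_drop s i c [] hd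
    rw [solutionAltGo]
    simp only [if_pos hlt, hc]
    have hno : ¬ (c = '(' ∧ i + 1 < s.length ∧ s.getD (i + 1) ' ' = ')') := by
      rintro ⟨_, h2, _⟩; omega
    rw [if_neg hno]
    by_cases hc2 : c = ')'
    · rw [if_pos hc2, go_terminal _ _ _ _ _ (by omega)]
      simp [lasersMarked, hc2, solutionLoop]
    · rw [if_neg hc2]
      by_cases hc1 : c = '('
      · rw [if_neg (by simp [hc1]), go_terminal _ _ _ _ _ (by omega)]
        simp [lasersMarked, hc1, solutionLoop]
      · rw [if_pos hc1, go_terminal _ _ _ _ _ (by omega)]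
        simp [lasersMarked, solutionLoop, hc1, hc2]
  | case3 c d t hcd ih =>
    obtain ⟨hc1', hc2'⟩ := hcd
    subst hc1' hc2'
    have hdt : s.drop (i + 1) = ')' :: t := drop_succ_of_drop s i '(' (')' :: t) hd
    have hdtt : s.drop (i + 2) = t := drop_succ_of_drop s (i + 1) ')' t hdt
    have hlen : s.length = i + 2 + t.length := by
      have := congrArg List.length hd
      simp [List.length_drop] at this
      omega
    have hc : s.getD i ' ' = '(' := getD_drop s i '(' _ hd
    have hc1 : s.getD (i + 1) ' ' = ')' := getD_drop s (i + 1) ')' _ hdt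
    rw [solutionAltGo]
    simp only [if_pos (show i < s.length by omega), hc, hc1]
    rw [if_pos (by refine ⟨?_, by omega, ?_⟩ <;> first | rfl | trivial)]
    have hL : lasersMarked ('(' :: ')' :: t) = 'L' :: lasersMarked t := by
      simp [lasersMarked]
    rw [hL]
    have hbal : (balList s 0).getD (i + 2) 0 = (balList s 0).getD i 0 := by
      rw [balList_getD _ _ _ (by omega), balList_getD _ _ _ (by omega)]
      have ht2 : s.take (i + 2) = s.take i ++ ['(', ')'] := by
        have h1 : s.take (i + 1) = s.take i ++ ['('] := by
          rw [List.take_add_one]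
          have : s[i]? = some '(' := by
            have h0 : (s.drop i)[0]? = s[i + 0]? := List.getElem?_drop
            rw [hd] at h0
            simpa using h0.symm
          simp [this]
        have h2 : s.take (i + 2) = s.take (i + 1) ++ [')'] := by
          rw [List.take_add_one]
          have : s[i + 1]? = some ')' := by
            have h0 : (s.drop (i + 1))[0]? = s[(i + 1) + 0]? := List.getElem?_drop
            rw [hdt] at h0
            simpa using h0.symm
          simp [this]
        rw [h2, h1]; simp
      rw [ht2]
      simp [pvDelta]
    rw [ih (i + 2) (a + (balList s 0).getD i 0) hdtt (by omega), hbal]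
    simp [solutionLoop]
  | case4 c d t hcd ih =>
    have hdt : s.drop (i + 1) = d :: t := drop_succ_of_drop s i c _ hd
    have hlen : s.length = i + 2 + t.length := by
      have := congrArg List.length hd
      simp [List.length_drop] at this
      omega
    have hc : s.getD i ' ' = c := getD_drop s i c _ hd
    have hc1 : s.getD (i + 1) ' ' = d := getD_drop s (i + 1) d _ hdt
    have hM : lasersMarked (c :: d :: t) = c :: lasersMarked (d :: t) := by
      simp [lasersMarked, hcd]
    have hbal : (balList s 0).getD (i + 1) 0 = (balList s 0).getD i 0 + pvDelta c := by
      rw [balList_getD _ _ _ (by omega), balList_getD _ _ _ (by omega)]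
      have h1 : s.take (i + 1) = s.take i ++ [c] := by
        rw [List.take_add_one]
        have : s[i]? = some c := by
          have h0 : (s.drop i)[0]? = s[i + 0]? := List.getElem?_drop
          rw [hd] at h0
          simpa using h0.symm
        simp [this]
      rw [h1]; simp
    rw [solutionAltGo]
    simp only [if_pos (show i < s.length by omega), hc, hc1]
    have hno : ¬ (c = '(' ∧ i + 1 < s.length ∧ d = ')') := by
      rintro ⟨ha, _, hb⟩; exact hcd ⟨ha, hb⟩
    rw [if_neg hno, hM]
    by_cases hc2 : c = ')'
    · rw [if_pos hc2]
      rw [ih (i + 1) (a + 1) hdt (by omega), hbal]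
      simp [solutionLoop, hc2, pvDelta, sub_eq_add_neg]
    · rw [if_neg hc2]
      by_cases hc1' : c = '('
      · rw [if_neg (by simp [hc1']), ih (i + 1) a hdt (by omega), hbal]
        simp [solutionLoop, hc1', pvDelta]
      · rw [if_pos hc1', ih (i + 1) (a + (balList s 0).getD i 0) hdt (by omega), hbal]
        simp [solutionLoop, hc1', hc2, pvDelta]

-- ===== VERDICT (by name: the statement is the Claim_ definition above) =====
theorem solution_spec : Claim_equal_solution := by
  intro arrangement _
  unfold Spec_solution solution solution_alt
  rw [PySem.Str.toList_replace]
  have h1 : ("()" : String).toList = ['(', ')'] := by decide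
  have h2 : ("L" : String).toList = ['L'] := by decide
  rw [h1, h2, replace_eq_lasersMarked]
  rw [go_eq_loop arrangement.toList arrangement.toList 0 0 (by simp) (by simp)]
  cases arrangement.toList <;> simp [balList]
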